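-- pv_equiv track=rewrite | github.com/YHS0201/gait | OpenGait/misc/make_company_subset_partition.py | filter_probe_set
-- ===== SOURCE A (Python) =====
-- from collections import defaultdict
--
-- def filter_probe_set(probe_entries, selected_test_ids, max_probe_per_test):
--     grouped = defaultdict(list)
--     selected_test_ids = list(selected_test_ids)
--
--     for entry in probe_entries:
--         matched_pid = None
--         for pid in selected_test_ids:
--             prefix = pid + '-'
--             if entry.startswith(prefix):
--                 matched_pid = pid
--                 break
--         if matched_pid is not None:
--             grouped[matched_pid].append(entry)
--
--     kept = []
--     for pid in selected_test_ids:
--         seqs = grouped.get(pid, [])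
--         if max_probe_per_test > 0:
--             seqs = seqs[:max_probe_per_test]
--         kept.extend(seqs)
--     return kept
-- ===== SOURCE B (Python) =====
-- def filter_probe_set(probe_entries, selected_test_ids, max_probe_per_test):
--     pids = list(selected_test_ids)
--     # rank: pid -> index of its first occurrence in pids
--     rank = {}
--     for i, pid in enumerate(pids):
--         rank.setdefault(pid, i)
--     groups = {}
--     for entry in probe_entries:
--         # candidate pids end at a '-' inside entry; keep the one of minimal rank
--         best = None
--         for j, ch in enumerate(entry):
--             if ch == '-':
--                 pre = entry[:j]
--                 r = rank.get(pre)
--                 if r is not None and (best is None or r < best[0]):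
--                     best = (r, pre)
--         if best is not None:
--             groups.setdefault(best[1], []).append(entry)
--     return [e for pid in pids
--               for e in (groups.get(pid, [])[:max_probe_per_test]
--                         if max_probe_per_test > 0 else groups.get(pid, []))]
-- ===== Notes on version B (the rewrite author's own statement) =====
-- stated objective: faster
-- what changed: Instead of scanning the whole selected-pid list for every entry, B builds a pid->first-index dict once and, per entry, looks up only the entry's dash-bounded prefixes, keeping the candidate of minimal index; the output is a flattening comprehension over the pid list.
import Mathlib
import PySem

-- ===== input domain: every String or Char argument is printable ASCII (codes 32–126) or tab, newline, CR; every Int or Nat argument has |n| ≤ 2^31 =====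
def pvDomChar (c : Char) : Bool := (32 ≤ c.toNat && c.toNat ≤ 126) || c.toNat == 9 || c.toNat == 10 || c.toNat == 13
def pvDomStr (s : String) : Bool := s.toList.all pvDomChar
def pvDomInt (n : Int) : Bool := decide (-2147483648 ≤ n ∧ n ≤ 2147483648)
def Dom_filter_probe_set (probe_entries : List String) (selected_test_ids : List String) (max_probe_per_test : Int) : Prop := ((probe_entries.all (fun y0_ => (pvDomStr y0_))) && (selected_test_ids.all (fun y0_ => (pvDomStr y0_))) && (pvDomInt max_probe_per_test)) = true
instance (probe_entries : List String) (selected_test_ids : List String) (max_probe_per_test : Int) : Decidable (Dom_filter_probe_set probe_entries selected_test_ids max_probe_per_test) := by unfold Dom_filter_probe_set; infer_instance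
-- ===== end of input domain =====

-- B replaces A's per-entry scan of the whole pid list by a pid->first-index dict consulted
-- only at the entry's dash-bounded prefixes (objective: faster; equivalence proved below).

-- ===== PORT A =====
-- inner loop 'for pid in selected_test_ids: … break' (first pid whose pid+'-' prefixes entry)
def pvFindPid (entry : String) : List String → Option String
  | [] => none
  | pid :: rest =>
      if PySem.Str.startswith entry (pid ++ "-") then some pid else pvFindPid entry rest

-- loop body: 'if matched_pid is not None: grouped[matched_pid].append(entry)' (defaultdict(list))
def pvGroupStepA (pids : List String) (d : PySem.Dict String (List String)) (entry : String) : PySem.Dict String (List String) :=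
  match pvFindPid entry pids with
  | some pid => d.modify pid [] (fun l => l ++ [entry])
  | none => d

def filter_probe_set (probe_entries : List String) (selected_test_ids : List String) (max_probe_per_test : Int) : List String :=
  -- grouped = defaultdict(list); for entry …: grouped[matched_pid].append(entry)
  let grouped : PySem.Dict String (List String) :=
    probe_entries.foldl (pvGroupStepA selected_test_ids) PySem.Dict.empty
  -- kept = []; for pid …: seqs = grouped.get(pid, []); truncate; kept.extend(seqs)
  selected_test_ids.foldl (fun kept pid =>
    let seqs := grouped.getD pid []
    let seqs := if max_probe_per_test > 0 then PySem.List.slice seqs none (some max_probe_per_test) else seqs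
    kept ++ seqs) []

-- ===== PORT B =====
-- rank = {}; for i, pid in enumerate(pids): rank.setdefault(pid, i)
def pvRank (pids : List String) : PySem.Dict String Int :=
  (PySem.List.enumerate pids 0).foldl (fun d q => d.setdefault q.2 q.1) PySem.Dict.empty

-- loop body of 'for j, ch in enumerate(entry): if ch == '-': …' keeping the best (rank, prefix)
def pvBestStep (rank : PySem.Dict String Int) (entry : String)
    (best : Option (Int × String)) (q : Int × Char) : Option (Int × String) :=
  if q.2 = '-' then
    let pre := PySem.Str.slice entry none (some q.1)   -- entry[:j]
    match rank.get? pre with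
    | some r =>
        match best with
        | none => some (r, pre)
        | some b => if r < b.1 then some (r, pre) else some b
    | none => best
  else best

def pvBest (rank : PySem.Dict String Int) (entry : String) : Option (Int × String) :=
  (PySem.List.enumerate entry.toList 0).foldl (pvBestStep rank entry) none

-- loop body: 'if best is not None: groups.setdefault(best[1], []).append(entry)'
def pvGroupStepB (rank : PySem.Dict String Int) (d : PySem.Dict String (List String)) (entry : String) : PySem.Dict String (List String) :=
  match pvBest rank entry with
  | some b => d.modify b.2 [] (fun l => l ++ [entry])
  | none => d

def filter_probe_set_alt (probe_entries : List String) (selected_test_ids : List String) (max_probe_per_test : Int) : List String :=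
  let rank := pvRank selected_test_ids
  -- groups = {}; … groups.setdefault(best[1], []).append(entry)
  let groups : PySem.Dict String (List String) :=
    probe_entries.foldl (pvGroupStepB rank) PySem.Dict.empty
  -- flattening comprehension over pids
  selected_test_ids.flatMap (fun pid =>
    if max_probe_per_test > 0 then PySem.List.slice (groups.getD pid []) none (some max_probe_per_test)
    else groups.getD pid [])

-- ===== PRECONDITION & SPEC =====
def Spec_filter_probe_set (probe_entries : List String) (selected_test_ids : List String) (max_probe_per_test : Int) (out : List String) : Prop := out = filter_probe_set_alt probe_entries selected_test_ids max_probe_per_test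
instance (probe_entries : List String) (selected_test_ids : List String) (max_probe_per_test : Int) (out : List String) : Decidable (Spec_filter_probe_set probe_entries selected_test_ids max_probe_per_test out) := by unfold Spec_filter_probe_set; infer_instance

-- ===== CLAIM (what is proved, stated in full; the proofs are below) =====
def Claim_equal_filter_probe_set : Prop := ∀ (probe_entries : List String) (selected_test_ids : List String) (max_probe_per_test : Int), Dom_filter_probe_set probe_entries selected_test_ids max_probe_per_test → Spec_filter_probe_set probe_entries selected_test_ids max_probe_per_test (filter_probe_set probe_entries selected_test_ids max_probe_per_test)

-- ===== LEMMAS AND PROOFS =====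

-- A's inner loop is find? over the pid list
theorem pvFindPid_eq_find? (entry : String) (pids : List String) :
    pvFindPid entry pids = pids.find? (fun pid => PySem.Str.startswith entry (pid ++ "-")) := by
  induction pids with
  | nil => rfl
  | cons x xs ih => simp [pvFindPid, List.find?, ih]; split <;> simp_all

-- rank.setdefault fold: lookup = first-occurrence index (shifted by the start of enumerate)
theorem pvRank_aux (pids : List String) (s : Int) (d : PySem.Dict String Int) (p : String) :
    ((PySem.List.enumerate pids s).foldl (fun d q => d.setdefault q.2 q.1) d).get? p =
      if d.contains p then d.get? p
      else (PySem.List.index? pids p).map (fun k => s + (k : Int)) := by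
  induction pids generalizing s d with
  | nil =>
      simp only [PySem.List.enumerate, List.foldl_nil, PySem.List.index?]
      split
      · rfl
      · next h => simp [(PySem.Dict.get?_eq_none_iff_contains d p).mpr (by simpa using h)]
  | cons x xs ih =>
      rw [PySem.List.enumerate_cons]
      simp only [List.foldl_cons]
      rw [ih]
      by_cases hx : p = x
      · subst hx
        rw [PySem.List.index?_cons_self]
        have hc : (d.setdefault p s).contains p = true := by
          rw [PySem.Dict.contains_setdefault]; simp
        rw [if_pos hc, PySem.Dict.get?_setdefault_self]
        by_cases hd : d.contains p
        · rw [if_pos hd]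
          cases hv : d.get? p with
          | none => exact absurd ((PySem.Dict.get?_eq_none_iff_contains d p).mp hv) (by simp [hd])
          | some v => simp [hv]
        · simp only [hd, if_false]
          have : d.get? p = none := (PySem.Dict.get?_eq_none_iff_contains d p).mpr (by simpa using hd)
          simp [this]
      · have hc : (d.setdefault x s).contains p = d.contains p := by
          rw [PySem.Dict.contains_setdefault]; simp [Ne.symm, hx]
        rw [hc, PySem.Dict.get?_setdefault_of_ne d s hx]
        rw [PySem.List.index?_cons_of_ne xs (Ne.symm hx)]
        by_cases hd : d.contains p
        · simp [hd]
        · simp only [hd, if_false]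
          cases PySem.List.index? xs p <;> simp
          omega

theorem pvRank_get? (pids : List String) (p : String) :
    (pvRank pids).get? p = (PySem.List.index? pids p).map (fun k => (k : Int)) := by
  unfold pvRank
  rw [pvRank_aux]
  simp

-- entry.startswith(p + '-') ↔ p is a dash-bounded prefix of entry
theorem startswith_dash_iff (entry p : String) :
    PySem.Str.startswith entry (p ++ "-") = true ↔
      ∃ j : Nat, ∃ h : j < entry.toList.length,
        entry.toList[j] = '-' ∧ p.toList = entry.toList.take j := by
  rw [show PySem.Str.startswith entry (p ++ "-") = PySem.Chars.startswith entry.toList (p ++ "-").toList from by simp,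
      PySem.Chars.startswith_iff, String.toList_append]
  have hdash : ("-" : String).toList = ['-'] := rfl
  rw [hdash]
  constructor
  · rintro ⟨t, ht⟩
    refine ⟨p.toList.length, ?_, ?_, ?_⟩
    · rw [← ht]; simp
    · have : (p.toList ++ ['-'] ++ t)[p.toList.length]'(by simp) = '-' := by
        rw [List.getElem_append_left (by simp)]
        simp
      simpa [← ht] using this
    · rw [← ht]
      simp
  · rintro ⟨j, hj, hc, hp⟩
    refine ⟨entry.toList.drop (j + 1), ?_⟩
    rw [hp]
    have := List.take_append_drop j entry.toList
    conv_rhs => rw [← this]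
    rw [List.drop_eq_getElem_cons hj, hc]
    simp

-- the candidate extractor behind B's dash scan
def pvCandO (rank : PySem.Dict String Int) (entry : String) (q : Int × Char) : Option (Int × String) :=
  if q.2 = '-' then
    (rank.get? (PySem.Str.slice entry none (some q.1))).map
      (fun r => (r, PySem.Str.slice entry none (some q.1)))
  else none

def pvMin (best : Option (Int × String)) (c : Int × String) : Option (Int × String) :=
  match best with
  | none => some c
  | some b => if c.1 < b.1 then some c else some b

theorem pvBestStep_eq (rank : PySem.Dict String Int) (entry : String) (best : Option (Int × String)) (q : Int × Char) :
    pvBestStep rank entry best q =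
      match pvCandO rank entry q with
      | some c => pvMin best c
      | none => best := by
  by_cases hq : q.2 = '-'
  · simp only [pvBestStep, pvCandO, pvMin, hq, if_pos rfl]
    cases hget : rank.get? (PySem.Str.slice entry none (some q.1)) <;> cases best <;> simp [hget]
  · simp [pvBestStep, pvCandO, hq]

theorem pvBest_eq_foldl (rank : PySem.Dict String Int) (entry : String) :
    pvBest rank entry =
      ((PySem.List.enumerate entry.toList 0).filterMap (pvCandO rank entry)).foldl pvMin none := by
  unfold pvBest
  rw [List.foldl_filterMap]
  apply PySem.List.foldl_congr_mem
  intro acc q _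
  rw [pvBestStep_eq]
  cases pvCandO rank entry q <;> rfl

-- membership facts about the candidate list
theorem mem_cand (pids : List String) (entry : String) (c : Int × String)
    (hc : c ∈ (PySem.List.enumerate entry.toList 0).filterMap (pvCandO (pvRank pids) entry)) :
    (pvRank pids).get? c.2 = some c.1 ∧ PySem.Str.startswith entry (c.2 ++ "-") = true := by
  rw [List.mem_filterMap] at hc
  obtain ⟨q, hq, hcq⟩ := hc
  rw [PySem.List.mem_enumerate_iff] at hq
  obtain ⟨k, hk, rfl⟩ := hq
  unfold pvCandO at hcq
  simp only [zero_add] at hcq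
  by_cases hch : entry.toList[k] = '-'
  · rw [if_pos hch] at hcq
    cases hget : (pvRank pids).get? (PySem.Str.slice entry none (some (k : Int))) with
    | none => simp [hget] at hcq
    | some r =>
        simp only [hget, Option.map_some] at hcq
        injection hcq with hcq
        subst hcq
        refine ⟨hget, ?_⟩
        rw [startswith_dash_iff]
        refine ⟨k, hk, hch, ?_⟩
        have : (PySem.Str.slice entry none (some (k : Int))).toList = entry.toList.take k := by
          simp [PySem.List.slice_to_natCast]
        simpa using this
  · rw [if_neg hch] at hcq; exact absurd hcq (by simp)

theorem cand_of_match (pids : List String) (entry p : String) (r : Int)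
    (hr : (pvRank pids).get? p = some r)
    (hm : PySem.Str.startswith entry (p ++ "-") = true) :
    (r, p) ∈ (PySem.List.enumerate entry.toList 0).filterMap (pvCandO (pvRank pids) entry) := by
  rw [startswith_dash_iff] at hm
  obtain ⟨j, hj, hc, hp⟩ := hm
  rw [List.mem_filterMap]
  refine ⟨((j : Int), entry.toList[j]), ?_, ?_⟩
  · rw [PySem.List.mem_enumerate_iff]
    exact ⟨j, hj, by simp⟩
  · unfold pvCandO
    have hpre : PySem.Str.slice entry none (some (j : Int)) = p := by
      apply String.toList_inj.mp
      rw [hp]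
      simp [PySem.List.slice_to_natCast]
    simp [hc, hpre, hr]

-- the min-fold returns a known least element
theorem foldl_min_keep (cs : List (Int × String)) (b0 : Int × String)
    (h : ∀ c ∈ cs, b0.1 ≤ c.1) : cs.foldl pvMin (some b0) = some b0 := by
  induction cs with
  | nil => rfl
  | cons c rest ih =>
      have hc := h c (by simp)
      simp only [List.foldl_cons]
      rw [show pvMin (some b0) c = some b0 from by unfold pvMin; simp; omega]
      exact ih (fun c hc' => h c (by simp [hc']))

theorem foldl_min_reach (cs : List (Int × String)) (r0 : Int) (p : String)
    (hmem : (r0, p) ∈ cs)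
    (hlb : ∀ c ∈ cs, r0 ≤ c.1)
    (huniq : ∀ c ∈ cs, c.1 = r0 → c = (r0, p))
    (acc : Option (Int × String))
    (hacc : acc = none ∨ ∃ b, acc = some b ∧ r0 ≤ b.1 ∧ (b.1 = r0 → b = (r0, p))) :
    cs.foldl pvMin acc = some (r0, p) := by
  induction cs generalizing acc with
  | nil => simp at hmem
  | cons c rest ih =>
      simp only [List.foldl_cons]
      by_cases hcp : c = (r0, p)
      · have hc1 : c.1 = r0 := by rw [hcp]
        have hstep : pvMin acc c = some (r0, p) := by
          rcases hacc with rfl | ⟨b, rfl, hb1, hb2⟩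
          · simp [pvMin, hcp]
          · unfold pvMin
            by_cases hlt : c.1 < b.1
            · show (if c.1 < b.1 then some c else some b) = some (r0, p)
              rw [if_pos hlt, hcp]
            · have hb : b.1 = r0 := by omega
              simp [hlt, hb2 hb, hcp]
        rw [hstep]
        exact foldl_min_keep rest _ (fun c' hc' => hlb c' (by simp [hc']))
      · have hmem' : (r0, p) ∈ rest := by
          rcases List.mem_cons.mp hmem with h | h
          · exact absurd h.symm hcp
          · exact h
        apply ih hmem' (fun c' hc' => hlb c' (by simp [hc']))
          (fun c' hc' h1 => huniq c' (by simp [hc']) h1)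
        right
        rcases hacc with rfl | ⟨b, rfl, hb1, hb2⟩
        · exact ⟨c, rfl, hlb c (by simp), huniq c (by simp)⟩
        · unfold pvMin
          by_cases hlt : c.1 < b.1
          · simp only [hlt, if_true]
            exact ⟨c, rfl, hlb c (by simp), huniq c (by simp)⟩
          · simp only [hlt, if_false]
            exact ⟨b, rfl, hb1, hb2⟩

-- MAIN LEMMA: B's dash scan finds exactly A's first-matching pid
theorem pvBest_eq_findPid (pids : List String) (entry : String) :
    (pvBest (pvRank pids) entry).map (·.2) = pvFindPid entry pids := by
  rw [pvFindPid_eq_find?, pvBest_eq_foldl]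
  cases hf : pids.find? (fun pid => PySem.Str.startswith entry (pid ++ "-")) with
  | none =>
      have hnone : ∀ pid ∈ pids, ¬ PySem.Str.startswith entry (pid ++ "-") = true := by
        simpa using List.find?_eq_none.mp hf
      have hnil : (PySem.List.enumerate entry.toList 0).filterMap (pvCandO (pvRank pids) entry) = [] := by
        apply List.eq_nil_iff_forall_not_mem.mpr
        intro c hc
        obtain ⟨hrank, hmatch⟩ := mem_cand pids entry c hc
        have hmem : c.2 ∈ pids := by
          rw [pvRank_get?] at hrank
          cases hix : PySem.List.index? pids c.2 with
          | none => rw [hix] at hrank; simp at hrank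
          | some kc => exact (PySem.List.index?_isSome_iff pids c.2).mp (by rw [hix]; rfl)
        exact hnone c.2 hmem hmatch
      rw [hnil]; rfl
  | some p =>
      obtain ⟨hp, as, bs, hsplit, has⟩ := List.find?_eq_some_iff_append.mp hf
      subst hsplit
      have hpmem : p ∈ as ++ p :: bs := by simp
      obtain ⟨k0, hk0⟩ := Option.isSome_iff_exists.mp ((PySem.List.index?_isSome_iff (as ++ p :: bs) p).mpr hpmem)
      have hrank0 : (pvRank (as ++ p :: bs)).get? p = some ((k0 : Nat) : Int) := by
        rw [pvRank_get?, hk0]; rfl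
      obtain ⟨hk0lt, hk0get, hk0first⟩ := PySem.List.getElem_of_index?_eq_some hk0
      have hatlen : as.length < (as ++ p :: bs).length := by simp
      have hgetlen : (as ++ p :: bs)[as.length]'hatlen = p := by
        rw [List.getElem_append_right (Nat.le_refl _)]; simp
      have hk0le : k0 ≤ as.length := by
        by_contra h
        push_neg at h
        exact hk0first as.length h hgetlen
      -- every candidate's rank is ≥ k0, with equality only at (k0, p)
      have hcand : ∀ c ∈ (PySem.List.enumerate entry.toList 0).filterMap (pvCandO (pvRank (as ++ p :: bs)) entry),
          ∃ kc : Nat, c.1 = (kc : Int) ∧ k0 ≤ kc ∧ (kc = k0 → c = ((k0 : Int), p)) := by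
        intro c hc
        obtain ⟨hrank, hmatch⟩ := mem_cand (as ++ p :: bs) entry c hc
        rw [pvRank_get?] at hrank
        cases hix : PySem.List.index? (as ++ p :: bs) c.2 with
        | none => rw [hix] at hrank; simp at hrank
        | some kc =>
        rw [hix] at hrank
        have hc1 : ((kc : Nat) : Int) = c.1 := by simpa using hrank
        obtain ⟨hkclt, hkcget, -⟩ := PySem.List.getElem_of_index?_eq_some hix
        have hkcge : as.length ≤ kc := by
          by_contra h
          push_neg at h
          have hmemas : (as ++ p :: bs)[kc]'hkclt ∈ as := by
            have e : (as ++ p :: bs)[kc]'hkclt = as[kc]'h := List.getElem_append_left h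
            rw [e]
            exact List.getElem_mem _
          rw [hkcget] at hmemas
          have hcontra := has c.2 hmemas
          simp at hmatch hcontra
          rw [hmatch] at hcontra
          simp at hcontra
        refine ⟨kc, hc1.symm, by omega, ?_⟩
        intro hkeq
        subst hkeq
        have hlen : kc = as.length := by omega
        have hc2 : c.2 = p := by rw [← hkcget]; subst hlen; exact hgetlen
        have : c = (c.1, c.2) := rfl
        rw [this, hc1.symm, hc2]
      have hmemc : ((k0 : Int), p) ∈ (PySem.List.enumerate entry.toList 0).filterMap (pvCandO (pvRank (as ++ p :: bs)) entry) :=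
        cand_of_match (as ++ p :: bs) entry p _ hrank0 hp
      rw [foldl_min_reach _ ((k0 : Int)) p hmemc
            (fun c hc => by obtain ⟨kc, h1, h2, -⟩ := hcand c hc; rw [h1]; exact_mod_cast h2)
            (fun c hc h1 => by
              obtain ⟨kc, hc1, -, h3⟩ := hcand c hc
              exact h3 (by rw [hc1] at h1; exact_mod_cast h1))
            none (Or.inl rfl)]
      rfl

theorem grouped_eq (pids : List String) (pe : List String) :
    pe.foldl (pvGroupStepA pids) PySem.Dict.empty =
    pe.foldl (pvGroupStepB (pvRank pids)) PySem.Dict.empty := by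
  apply PySem.List.foldl_congr_mem
  intro d entry _
  have h := pvBest_eq_findPid pids entry
  unfold pvGroupStepA pvGroupStepB
  cases hb : pvBest (pvRank pids) entry with
  | none => rw [hb] at h; simp at h; rw [← h]
  | some b => rw [hb] at h; simp at h; rw [← h]

-- ===== VERDICT (by name: the statement is the Claim_ definition above) =====
theorem filter_probe_set_spec : Claim_equal_filter_probe_set := by
  intro pe pids m _
  unfold Spec_filter_probe_set filter_probe_set filter_probe_set_alt
  simp only [grouped_eq]
  set G := pe.foldl (pvGroupStepB (pvRank pids)) PySem.Dict.empty with hG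
  rw [PySem.List.foldl_append_eq_flatMap
      (g := fun pid => if m > 0 then PySem.List.slice (G.getD pid []) none (some m) else G.getD pid [])]
  simp
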